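-- pv_equiv track=rewrite | github.com/posl/comment_recommendation | script/split_gen/3_time/zh/248_C/0.py | solve
-- ===== SOURCE A (Python) =====
-- def solve(N,M,K):
--     dp = [[[0 for _ in range(K+1)] for _ in range(M+1)] for _ in range(N+1)]
--     for i in range(1,M+1):
--         dp[1][i][i] = 1
--     for i in range(2,N+1):
--         for j in range(1,M+1):
--             for k in range(1,K+1):
--                 if k-j>=0:
--                     dp[i][j][k] = sum(dp[i-1][j][k-j:])
--     return sum(dp[N][j][K] for j in range(1,M+1))%(998244353)
-- ===== SOURCE B (Python) =====
-- def solve(N, M, K):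
--     # Same count, but each new dp cell reads a precomputed suffix sum instead of
--     # re-summing a slice: O(N*M*K) instead of O(N*M*K^2). Rows are independent in j.
--     MOD = 998244353
--     if M <= 0:
--         return 0
--     cur = [[0] * (K + 1) for _ in range(M + 1)]
--     for j in range(1, M + 1):
--         cur[j][j] = 1
--     for _ in range(2, N + 1):
--         nxt = [[0] * (K + 1) for _ in range(M + 1)]
--         for j in range(1, M + 1):
--             suf = [0] * (K + 2)
--             for k in range(K, -1, -1):
--                 suf[k] = suf[k + 1] + cur[j][k]
--             for k in range(j, K + 1):
--                 nxt[j][k] = suf[k - j]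
--         cur = nxt
--     return sum(cur[j][K] for j in range(1, M + 1)) % MOD
-- ===== Notes on version B (the rewrite author's own statement) =====
-- stated objective: faster
-- what changed: B keeps only two rolling 2D layers and builds a suffix-cumulative-sum array per (layer,j) so each cell is one O(1) lookup instead of summing a slice, dropping a factor of K.
import Mathlib
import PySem

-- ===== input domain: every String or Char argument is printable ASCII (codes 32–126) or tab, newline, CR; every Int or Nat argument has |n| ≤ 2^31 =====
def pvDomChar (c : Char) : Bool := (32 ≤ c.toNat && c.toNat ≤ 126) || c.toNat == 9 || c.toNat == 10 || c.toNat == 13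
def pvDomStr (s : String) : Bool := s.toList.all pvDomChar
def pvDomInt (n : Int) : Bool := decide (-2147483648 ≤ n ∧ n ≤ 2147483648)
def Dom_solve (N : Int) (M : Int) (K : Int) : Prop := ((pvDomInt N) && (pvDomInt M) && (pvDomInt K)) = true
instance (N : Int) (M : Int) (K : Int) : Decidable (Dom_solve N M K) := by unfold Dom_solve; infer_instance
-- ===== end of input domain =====

-- B replaces A's per-cell slice re-summation by two rolling layers with a per-row suffix-sum
-- array (one O(1) lookup per cell); measured faster in a timing run.


-- ===== PORT A =====
-- Python list assignment dp[x][y][z] = v is ported as modify/set at .toNat; exact here because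
-- every executed assignment in A (on inputs satisfying Pre_) uses in-range nonnegative indices.
def solve (N : Int) (M : Int) (K : Int) : Int :=
  let dp := (PySem.List.pyRange 0 (N+1)).map (fun _ =>
    (PySem.List.pyRange 0 (M+1)).map (fun _ =>
      (PySem.List.pyRange 0 (K+1)).map (fun _ => (0 : Int))))
  let dp := (PySem.List.pyRange 1 (M+1)).foldl (fun dp i =>
    dp.modify 1 (fun r => r.modify i.toNat (fun c => c.set i.toNat 1))) dp
  let dp := (PySem.List.pyRange 2 (N+1)).foldl (fun dp i =>
    (PySem.List.pyRange 1 (M+1)).foldl (fun dp j =>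
      (PySem.List.pyRange 1 (K+1)).foldl (fun dp k =>
        if k - j ≥ 0 then
          dp.modify i.toNat (fun r => r.modify j.toNat (fun c => c.set k.toNat
            ((PySem.List.slice (PySem.List.pyGetD (PySem.List.pyGetD dp (i-1) []) j []) (some (k-j)) none).sum)))
        else dp) dp) dp) dp
  PySem.Int.mod ((PySem.List.pyRange 1 (M+1)).foldl (fun s j =>
    s + PySem.List.pyGetD (PySem.List.pyGetD (PySem.List.pyGetD dp N []) j []) K 0) 0) 998244353

-- ===== PORT B =====
def solve_alt (N : Int) (M : Int) (K : Int) : Int :=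
  if M ≤ 0 then 0 else
  let cur := (PySem.List.pyRange 0 (M+1)).map (fun _ =>
    (PySem.List.pyRange 0 (K+1)).map (fun _ => (0 : Int)))
  let cur := (PySem.List.pyRange 1 (M+1)).foldl (fun cur j =>
    cur.modify j.toNat (fun c => c.set j.toNat 1)) cur
  let cur := (PySem.List.pyRange 2 (N+1)).foldl (fun cur _ =>
    let nxt0 := (PySem.List.pyRange 0 (M+1)).map (fun _ =>
      (PySem.List.pyRange 0 (K+1)).map (fun _ => (0 : Int)))
    (PySem.List.pyRange 1 (M+1)).foldl (fun nxt j =>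
      let suf := (PySem.List.pyRange 0 (K+2)).map (fun _ => (0 : Int))
      let suf := (PySem.List.pyRange K (-1) (-1)).foldl (fun suf k =>
        suf.set k.toNat (PySem.List.pyGetD suf (k+1) 0 +
          PySem.List.pyGetD (PySem.List.pyGetD cur j []) k 0)) suf
      (PySem.List.pyRange j (K+1)).foldl (fun nxt k =>
        nxt.modify j.toNat (fun c => c.set k.toNat (PySem.List.pyGetD suf (k-j) 0))) nxt) nxt0) cur
  PySem.Int.mod ((PySem.List.pyRange 1 (M+1)).foldl (fun s j =>
    s + PySem.List.pyGetD (PySem.List.pyGetD cur j []) K 0) 0) 998244353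

-- ===== PRECONDITION & SPEC =====
-- Pre_ is exactly where Python A returns: for M ≥ 1 the init loop writes dp[1][i][i],
-- which raises IndexError unless N ≥ 1 and M ≤ K; for M ≤ 0 every loop body is skipped.
def Pre_solve (N : Int) (M : Int) (K : Int) : Prop := M ≤ 0 ∨ (1 ≤ N ∧ 1 ≤ M ∧ M ≤ K)
instance (N : Int) (M : Int) (K : Int) : Decidable (Pre_solve N M K) := by unfold Pre_solve; infer_instance
def pvWitness_solve : Int × Int × Int := (3, 2, 5)
def Spec_solve (N : Int) (M : Int) (K : Int) (out : Int) : Prop := out = solve_alt N M K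
instance (N : Int) (M : Int) (K : Int) (out : Int) : Decidable (Spec_solve N M K out) := by unfold Spec_solve; infer_instance

-- ===== CLAIM (what is proved, stated in full; the proofs are below) =====
def Claim_equal_solve : Prop := ∀ (N : Int) (M : Int) (K : Int), Dom_solve N M K → Pre_solve N M K → Spec_solve N M K (solve N M K)

-- ===== LEMMAS AND PROOFS =====

-- the mathematical layer: row j of layer c+1 of A's dp
def frow (K j : Int) : Nat → Int → Int
  | 0, k => if k = j then 1 else 0
  | c+1, k => if 1 ≤ k ∧ j ≤ k then ((PySem.List.pyRange (k-j) (K+1)).map (frow K j c)).sum else 0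

def zRow (K : Int) : List Int := (PySem.List.pyRange 0 (K+1)).map (fun _ => (0 : Int))
def zMat (M K : Int) : List (List Int) := (PySem.List.pyRange 0 (M+1)).map (fun _ => zRow K)
def rowF (K j : Int) (c : Nat) : List Int := (PySem.List.pyRange 0 (K+1)).map (frow K j c)
def matF (M K : Int) (c : Nat) : List (List Int) :=
  (PySem.List.pyRange 0 (M+1)).map (fun j => if 1 ≤ j then rowF K j c else zRow K)
def sufS (K j : Int) (c : Nat) (m : Int) : Int := ((PySem.List.pyRange m (K+1)).map (frow K j c)).sum

lemma pv_modify_id {α : Type} (l : List α) (i : Nat) : l.modify i (fun x => x) = l := by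
  apply List.ext_getElem (by simp)
  intro m h1 h2; simp [List.getElem_modify]

lemma pv_getD_modify_ne {α : Type} (l : List α) (i j : Nat) (f : α → α) (d : α) (h : i ≠ j) :
    (l.modify i f).getD j d = l.getD j d := by
  simp [List.getD_eq_getElem?_getD, h]

lemma pv_modify_map_pyRange {α : Type} (g : Int → α) (n i : Int) (h : α → α)
    (h0 : 0 ≤ i) (_h1 : i < n) :
    ((PySem.List.pyRange 0 n).map g).modify i.toNat h
      = (PySem.List.pyRange 0 n).map (fun t => if t = i then h (g t) else g t) := by
  apply List.ext_getElem (by simp)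
  intro m hm1 hm2
  simp only [List.getElem_modify, List.getElem_map, PySem.List.getElem_pyRange_one]
  have hl : m < (n - 0).toNat := by simpa [PySem.List.length_pyRange_one] using hm2
  have : (i.toNat = m) ↔ ((0:Int) + m = i) := by omega
  rcases eq_or_ne i.toNat m with he | he
  · simp [he, this.mp he]
  · have h2 : ¬ ((m:Int) = i) := by omega
    simp [he, h2]

lemma pv_foldl_modify_same {α : Type} (xs : List Int) (I : Nat) (g : Int → α → α) (l : List α) :
    xs.foldl (fun acc x => acc.modify I (g x)) l
      = l.modify I (fun m => xs.foldl (fun m x => g x m) m) := by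
  induction xs generalizing l with
  | nil => simp [pv_modify_id]
  | cons x xs ih =>
      simp only [List.foldl_cons]
      rw [ih, List.modify_modify_eq]
      rfl

lemma pv_foldl_modify_read {μ : Type} (xs : List Int) (dp : List μ) (I R : Nat) (d : μ)
    (hne : R ≠ I) (g : Int → μ → μ → μ) :
    xs.foldl (fun acc x => acc.modify I (g x (acc.getD R d))) dp
      = dp.modify I (fun m => xs.foldl (fun m x => g x (dp.getD R d) m) m) := by
  induction xs generalizing dp with
  | nil => simp [pv_modify_id]
  | cons x xs ih =>
      simp only [List.foldl_cons]
      rw [ih, pv_getD_modify_ne _ _ _ _ _ (Ne.symm hne), List.modify_modify_eq]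
      rfl

lemma pv_foldl_modify_distinct {α : Type} (g : Int → α) (h : Int → α → α) (n a b : Int)
    (h0 : 0 ≤ a) (hb : b ≤ n) :
    (PySem.List.pyRange a b).foldl (fun l t => l.modify t.toNat (h t)) ((PySem.List.pyRange 0 n).map g)
      = (PySem.List.pyRange 0 n).map (fun t => if a ≤ t ∧ t < b then h t (g t) else g t) := by
  rcases le_or_gt b a with hba | hab
  · rw [PySem.List.pyRange_one_eq_nil hba]
    simp only [List.foldl_nil]
    apply List.map_congr_left
    intro t ht
    have : ¬ (a ≤ t ∧ t < b) := by omega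
    simp [this]
  · induction hn : (b - a).toNat generalizing b with
    | zero => omega
    | succ m ih =>
        have hsplit : PySem.List.pyRange a b = PySem.List.pyRange a (b-1) ++ [b-1] := by
          have := PySem.List.pyRange_one_succ_right (a:=a) (b:=b-1) (by omega)
          simpa using this
        rw [hsplit, List.foldl_append]
        rcases le_or_gt (b-1) a with h1 | h1
        · rw [PySem.List.pyRange_one_eq_nil h1]
          simp only [List.foldl_nil, List.foldl_cons]
          rw [pv_modify_map_pyRange g n (b-1) _ (by omega) (by omega)]
          apply List.map_congr_left
          intro t ht
          by_cases he : t = b - 1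
          · subst he
            simp [show a ≤ b - 1 from by omega, show b - 1 < b from by omega]
          · have c1 : ¬ (a ≤ t ∧ t < b) := by omega
            simp [he, c1]
        · rw [ih (b-1) (by omega) (by omega) (by omega)]
          simp only [List.foldl_cons, List.foldl_nil]
          rw [pv_modify_map_pyRange _ n (b-1) _ (by omega) (by omega)]
          apply List.map_congr_left
          intro t ht
          by_cases he : t = b - 1
          · subst he
            simp [show a ≤ b - 1 from by omega, show b - 1 < b from by omega]
          · by_cases hc : a ≤ t ∧ t < b - 1
            · have hc2 : a ≤ t ∧ t < b := by omega
              simp [he, hc, hc2]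
            · have hc2 : ¬ (a ≤ t ∧ t < b) := by omega
              simp [he, hc, hc2]

lemma pv_drop_map_pyRange {α : Type} (f : Int → α) (n m : Int) (h0 : 0 ≤ m) (h1 : m ≤ n) :
    ((PySem.List.pyRange 0 n).map f).drop m.toNat = (PySem.List.pyRange m n).map f := by
  rw [PySem.List.pyRange_one_append 0 m n h0 h1, List.map_append]
  have hlen : ((PySem.List.pyRange 0 m).map f).length = m.toNat := by
    simp [PySem.List.length_pyRange_one]
  rw [← hlen, List.drop_left]

lemma pv_filter_pyRange (j b : Int) (h1 : 1 ≤ j) (hb : j ≤ b) :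
    (PySem.List.pyRange 1 b).filter (fun k => decide (k - j ≥ 0)) = PySem.List.pyRange j b := by
  rw [PySem.List.pyRange_one_append 1 j b h1 hb, List.filter_append]
  have e1 : (PySem.List.pyRange 1 j).filter (fun k => decide (k - j ≥ 0)) = [] := by
    apply List.filter_eq_nil_iff.2
    intro k hk
    have := PySem.List.mem_pyRange_one.1 hk
    simp; omega
  have e2 : (PySem.List.pyRange j b).filter (fun k => decide (k - j ≥ 0)) = PySem.List.pyRange j b := by
    apply List.filter_eq_self.2
    intro k hk
    have := PySem.List.mem_pyRange_one.1 hk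
    simp; omega
  rw [e1, e2, List.nil_append]

lemma pv_get_matF (M K j : Int) (c : Nat) (h1 : 1 ≤ j) (h2 : j ≤ M) :
    PySem.List.pyGetD (matF M K c) j [] = rowF K j c := by
  unfold matF
  rw [PySem.List.pyGetD_map_pyRange_of_nonneg _ _ _ _ (by omega) (by omega)]
  simp [h1]

lemma pv_get_rowF (K j k : Int) (c : Nat) (h0 : 0 ≤ k) (h1 : k ≤ K) :
    PySem.List.pyGetD (rowF K j c) k 0 = frow K j c k := by
  unfold rowF
  rw [PySem.List.pyGetD_map_pyRange_of_nonneg _ _ _ _ (by omega) (by omega)]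

lemma pv_sufS_step (K j t : Int) (c : Nat) (ht : t ≤ K) :
    sufS K j c t = frow K j c t + sufS K j c (t+1) := by
  unfold sufS
  rw [PySem.List.pyRange_one_cons (by omega : t < K + 1)]
  simp

lemma pv_row_step (K j : Int) (c : Nat) (h1 : 1 ≤ j) (_hK : j ≤ K) :
    (PySem.List.pyRange j (K+1)).foldl (fun row k => row.set k.toNat (sufS K j c (k-j))) (zRow K)
      = rowF K j (c+1) := by
  unfold zRow
  rw [PySem.List.foldl_congr_mem _ _
        (fun row k => row.modify k.toNat (fun _ => sufS K j c (k-j))) _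
        (by intro acc x hx; rw [List.set_eq_modify])]
  rw [pv_foldl_modify_distinct _ _ (K+1) j (K+1) (by omega) (by omega)]
  apply List.map_congr_left
  intro t ht
  have hmem := PySem.List.mem_pyRange_one.1 ht
  show _ = frow K j (c+1) t
  rw [show frow K j (c+1) t = if 1 ≤ t ∧ j ≤ t then ((PySem.List.pyRange (t-j) (K+1)).map (frow K j c)).sum else 0 from rfl]
  by_cases hc : j ≤ t
  · simp [hc, show t < K + 1 from by omega, show 1 ≤ t from by omega, sufS]
  · simp [hc]

lemma pv_row_init (K j : Int) (h1 : 1 ≤ j) (hK : j ≤ K) :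
    (zRow K).set j.toNat 1 = rowF K j 0 := by
  unfold zRow
  rw [List.set_eq_modify, pv_modify_map_pyRange _ _ j _ (by omega) (by omega)]
  apply List.map_congr_left
  intro t ht
  show _ = frow K j 0 t
  rw [show frow K j 0 t = if t = j then 1 else 0 from rfl]

lemma pv_mat_init (M K : Int) (_hM : 1 ≤ M) (hMK : M ≤ K) :
    (PySem.List.pyRange 1 (M+1)).foldl (fun mat j => mat.modify j.toNat (fun c => c.set j.toNat 1)) (zMat M K)
      = matF M K 0 := by
  unfold zMat
  rw [pv_foldl_modify_distinct _ _ (M+1) 1 (M+1) (by omega) (by omega)]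
  unfold matF
  apply List.map_congr_left
  intro t ht
  have hmem := PySem.List.mem_pyRange_one.1 ht
  by_cases hc : 1 ≤ t
  · rw [if_pos ⟨hc, by omega⟩, if_pos hc, pv_row_init K t hc (by omega)]
  · rw [if_neg (by omega), if_neg hc]

def dpF (N M K : Int) (i : Int) : List (List (List Int)) :=
  (PySem.List.pyRange 0 (N+1)).map (fun t => if 1 ≤ t ∧ t ≤ i then matF M K (t-1).toNat else zMat M K)

lemma pv_A_kfold (K a j : Int) (h2 : 2 ≤ a) (dp : List (List (List Int))) :
    (PySem.List.pyRange 1 (K+1)).foldl (fun dp k =>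
        if k - j ≥ 0 then
          dp.modify a.toNat (fun r => r.modify j.toNat (fun c => c.set k.toNat
            ((PySem.List.slice (PySem.List.pyGetD (PySem.List.pyGetD dp (a-1) []) j []) (some (k-j)) none).sum)))
        else dp) dp
      = dp.modify a.toNat (fun m =>
          (PySem.List.pyRange 1 (K+1)).foldl (fun m k =>
            if k - j ≥ 0 then m.modify j.toNat (fun c => c.set k.toNat
              ((PySem.List.slice (PySem.List.pyGetD (dp.getD (a-1).toNat []) j []) (some (k-j)) none).sum))
            else m) m) := by
  have hRne : (a-1).toNat ≠ a.toNat := by omega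
  rw [PySem.List.foldl_congr_mem _ _
       (fun acc k => acc.modify a.toNat
         ((fun (k : Int) (r : List (List Int)) (m : List (List Int)) =>
            if k - j ≥ 0 then m.modify j.toNat (fun c => c.set k.toNat
              ((PySem.List.slice (PySem.List.pyGetD r j []) (some (k-j)) none).sum)) else m)
           k (acc.getD (a-1).toNat []))) _
       (by
         intro acc k hk
         by_cases hkj : k - j ≥ 0
         · simp only [hkj, if_true]
           rw [PySem.List.pyGetD_of_nonneg acc [] (by omega : (0:Int) ≤ a - 1)]
         · simp only [hkj, if_false, pv_modify_id])]
  rw [pv_foldl_modify_read _ dp a.toNat (a-1).toNat [] hRne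
        (fun (k : Int) (r : List (List Int)) (m : List (List Int)) =>
            if k - j ≥ 0 then m.modify j.toNat (fun c => c.set k.toNat
              ((PySem.List.slice (PySem.List.pyGetD r j []) (some (k-j)) none).sum)) else m)]

lemma pv_A_matfold (M K j : Int) (hj1 : 1 ≤ j) (hjM : j ≤ M) (hMK : M ≤ K) (c : Nat)
    (m : List (List Int)) :
    (PySem.List.pyRange 1 (K+1)).foldl (fun m k =>
        if k - j ≥ 0 then m.modify j.toNat (fun cc => cc.set k.toNat
          ((PySem.List.slice (PySem.List.pyGetD (matF M K c) j []) (some (k-j)) none).sum))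
        else m) m
      = m.modify j.toNat (fun row =>
          (PySem.List.pyRange j (K+1)).foldl (fun row k =>
            row.set k.toNat (sufS K j c (k-j))) row) := by
  rw [pv_get_matF M K j _ hj1 hjM]
  rw [PySem.List.foldl_congr_mem _ _
       (fun m k => m.modify j.toNat (fun row =>
          if k - j ≥ 0 then row.set k.toNat (sufS K j c (k-j)) else row)) _
       (by
         intro m k hk
         have hmem := PySem.List.mem_pyRange_one.1 hk
         by_cases hkj : k - j ≥ 0
         · have hv : (PySem.List.slice (rowF K j c) (some (k-j)) none).sum
              = sufS K j c (k-j) := by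
             have he : ((k-j).toNat : Int) = k - j := Int.toNat_of_nonneg (by omega)
             rw [← he, PySem.List.slice_from_natCast]
             unfold rowF
             have := pv_drop_map_pyRange (frow K j c) (K+1) (k-j) (by omega) (by omega)
             rw [this]
             unfold sufS
             rw [he]
           simp only [hkj, if_true, hv]
         · simp only [hkj, if_false, pv_modify_id])]
  rw [pv_foldl_modify_same]
  congr 1
  funext row
  have hE := PySem.List.foldl_ite_eq_foldl_filter (fun k : Int => k - j ≥ 0)
      (fun (row : List Int) (k : Int) => row.set k.toNat (sufS K j c (k-j)))
      (PySem.List.pyRange 1 (K+1)) row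
  rw [hE, pv_filter_pyRange j (K+1) hj1 (by omega)]

lemma pv_get_dpF (N M K i t : Int) (h0 : 0 ≤ t) (h1 : t ≤ N) (h2 : 1 ≤ t) (h3 : t ≤ i) :
    PySem.List.pyGetD (dpF N M K i) t [] = matF M K (t-1).toNat := by
  unfold dpF
  rw [PySem.List.pyGetD_map_pyRange_of_nonneg _ _ _ _ (by omega) (by omega)]
  simp [h2, h3]

lemma pv_A_step (N M K a : Int) (_hM : 1 ≤ M) (hMK : M ≤ K) (h2 : 2 ≤ a) (ha : a ≤ N) :
    (PySem.List.pyRange 1 (M+1)).foldl (fun dp j =>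
      (PySem.List.pyRange 1 (K+1)).foldl (fun dp k =>
        if k - j ≥ 0 then
          dp.modify a.toNat (fun r => r.modify j.toNat (fun c => c.set k.toNat
            ((PySem.List.slice (PySem.List.pyGetD (PySem.List.pyGetD dp (a-1) []) j []) (some (k-j)) none).sum)))
        else dp) dp) (dpF N M K (a-1))
      = dpF N M K a := by
  have hRne : (a-1).toNat ≠ a.toNat := by omega
  rw [PySem.List.foldl_congr_mem _ _
       (fun acc j => acc.modify a.toNat
         ((fun (j : Int) (r : List (List Int)) (m : List (List Int)) =>
            (PySem.List.pyRange 1 (K+1)).foldl (fun m k =>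
              if k - j ≥ 0 then m.modify j.toNat (fun c => c.set k.toNat
                ((PySem.List.slice (PySem.List.pyGetD r j []) (some (k-j)) none).sum))
              else m) m)
           j (acc.getD (a-1).toNat []))) _
       (by intro acc j hj; exact pv_A_kfold K a j h2 acc)]
  rw [pv_foldl_modify_read _ _ a.toNat (a-1).toNat [] hRne
        (fun (j : Int) (r : List (List Int)) (m : List (List Int)) =>
            (PySem.List.pyRange 1 (K+1)).foldl (fun m k =>
              if k - j ≥ 0 then m.modify j.toNat (fun c => c.set k.toNat
                ((PySem.List.slice (PySem.List.pyGetD r j []) (some (k-j)) none).sum))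
              else m) m)]
  have hget : (dpF N M K (a-1)).getD (a-1).toNat [] = matF M K (a-2).toNat := by
    rw [← PySem.List.pyGetD_of_nonneg _ _ (by omega : (0:Int) ≤ a-1)]
    rw [pv_get_dpF N M K (a-1) (a-1) (by omega) (by omega) (by omega) (by omega)]
    congr 1
    omega
  rw [hget]
  unfold dpF
  rw [pv_modify_map_pyRange _ (N+1) a _ (by omega) (by omega)]
  apply List.map_congr_left
  intro t ht
  have hmem := PySem.List.mem_pyRange_one.1 ht
  by_cases he : t = a
  · subst he
    rw [if_pos rfl, if_neg (by omega : ¬ (1 ≤ t ∧ t ≤ t - 1)), if_pos (by omega : 1 ≤ t ∧ t ≤ t)]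
    rw [PySem.List.foldl_congr_mem _ _
         (fun m j => m.modify j.toNat (fun row =>
            (PySem.List.pyRange j (K+1)).foldl (fun row k =>
              row.set k.toNat (sufS K j (t-2).toNat (k-j))) row)) _
         (by
           intro m j hj
           have hjm := PySem.List.mem_pyRange_one.1 hj
           exact pv_A_matfold M K j (by omega) (by omega) hMK (t-2).toNat m)]
    unfold zMat
    rw [pv_foldl_modify_distinct _ _ (M+1) 1 (M+1) (by omega) (by omega)]
    unfold matF
    apply List.map_congr_left
    intro u hu
    have humem := PySem.List.mem_pyRange_one.1 hu
    by_cases hc : 1 ≤ u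
    · rw [if_pos ⟨hc, by omega⟩, if_pos hc]
      rw [pv_row_step K u (t-2).toNat hc (by omega)]
      congr 1
      omega
    · rw [if_neg (by omega), if_neg hc]
  · rw [if_neg he]
    by_cases hc : 1 ≤ t ∧ t ≤ a - 1
    · rw [if_pos hc, if_pos (by omega : 1 ≤ t ∧ t ≤ a)]
    · rw [if_neg hc, if_neg (by omega : ¬ (1 ≤ t ∧ t ≤ a))]

lemma pv_A_init (N M K : Int) (hN : 1 ≤ N) (hM : 1 ≤ M) (hMK : M ≤ K) :
    (PySem.List.pyRange 1 (M+1)).foldl (fun dp i =>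
        dp.modify 1 (fun r => r.modify i.toNat (fun c => c.set i.toNat 1)))
      ((PySem.List.pyRange 0 (N+1)).map (fun _ => zMat M K))
      = dpF N M K 1 := by
  refine (pv_foldl_modify_same (PySem.List.pyRange 1 (M+1)) 1
      (fun i => fun (r : List (List Int)) => r.modify i.toNat (fun c => c.set i.toNat 1))
      ((PySem.List.pyRange 0 (N+1)).map (fun _ => zMat M K))).trans ?_
  rw [show (1:Nat) = (1:Int).toNat from rfl,
      pv_modify_map_pyRange _ (N+1) 1 _ (by omega) (by omega)]
  unfold dpF
  apply List.map_congr_left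
  intro t ht
  by_cases he : t = 1
  · subst he
    rw [if_pos rfl, if_pos (by omega : 1 ≤ (1:Int) ∧ (1:Int) ≤ 1)]
    rw [pv_mat_init M K hM hMK]
    rfl
  · rw [if_neg he, if_neg (by omega : ¬ (1 ≤ t ∧ t ≤ 1))]

lemma pv_A_loop (N M K : Int) (hM : 1 ≤ M) (hMK : M ≤ K) (i : Int) (h1 : 1 ≤ i) (hiN : i ≤ N) :
    (PySem.List.pyRange (i+1) (N+1)).foldl (fun dp i =>
      (PySem.List.pyRange 1 (M+1)).foldl (fun dp j =>
        (PySem.List.pyRange 1 (K+1)).foldl (fun dp k =>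
          if k - j ≥ 0 then
            dp.modify i.toNat (fun r => r.modify j.toNat (fun c => c.set k.toNat
              ((PySem.List.slice (PySem.List.pyGetD (PySem.List.pyGetD dp (i-1) []) j []) (some (k-j)) none).sum)))
          else dp) dp) dp) (dpF N M K i)
      = dpF N M K N := by
  induction hn : (N - i).toNat generalizing i with
  | zero =>
      have hiN' : i = N := by omega
      subst hiN'
      rw [PySem.List.pyRange_one_eq_nil (le_refl (i+1))]
      rfl
  | succ m ih =>
      rw [PySem.List.pyRange_one_cons (by omega : i + 1 < N + 1)]
      simp only [List.foldl_cons]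
      have hstep := pv_A_step N M K (i+1) hM hMK (by omega) (by omega)
      conv_lhs => rw [show dpF N M K i = dpF N M K (i+1-1) from by congr 1; omega]
      rw [hstep]
      exact ih (i+1) (by omega) (by omega) (by omega)

lemma pv_suf_aux (K j : Int) (c : Nat) (t : Int) (h0 : -1 ≤ t) (h1 : t ≤ K) :
    (PySem.List.pyRange t (-1) (-1)).foldl (fun suf k =>
        suf.set k.toNat (PySem.List.pyGetD suf (k+1) 0 + PySem.List.pyGetD (rowF K j c) k 0))
      ((PySem.List.pyRange 0 (K+2)).map (fun u => if t+1 ≤ u then sufS K j c u else 0))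
      = (PySem.List.pyRange 0 (K+2)).map (fun u => if 0 ≤ u then sufS K j c u else 0) := by
  induction hn : (t+1).toNat generalizing t with
  | zero =>
      have ht : t = -1 := by omega
      subst ht
      rw [PySem.List.pyRange_neg_one_eq_nil (le_refl (-1))]
      norm_num
  | succ m ih =>
      have ht0 : 0 ≤ t := by omega
      rw [PySem.List.pyRange_neg_one_cons (by omega : (-1:Int) < t)]
      simp only [List.foldl_cons]
      have hg1 : PySem.List.pyGetD ((PySem.List.pyRange 0 (K+2)).map
          (fun u => if t+1 ≤ u then sufS K j c u else 0)) (t+1) 0 = sufS K j c (t+1) := by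
        rw [PySem.List.pyGetD_map_pyRange_of_nonneg _ _ _ _ (by omega) (by omega)]
        simp
      have hg2 : PySem.List.pyGetD (rowF K j c) t 0 = frow K j c t := pv_get_rowF _ _ _ _ ht0 h1
      rw [hg1, hg2, List.set_eq_modify, pv_modify_map_pyRange _ (K+2) t _ (by omega) (by omega)]
      have hmap : ((PySem.List.pyRange 0 (K+2)).map (fun u =>
            if u = t then sufS K j c (t+1) + frow K j c t
            else if t+1 ≤ u then sufS K j c u else 0))
          = (PySem.List.pyRange 0 (K+2)).map (fun u => if (t-1)+1 ≤ u then sufS K j c u else 0) := by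
        apply List.map_congr_left
        intro u hu
        by_cases he : u = t
        · subst he
          rw [if_pos rfl, if_pos (by omega : (u-1)+1 ≤ u)]
          rw [pv_sufS_step K j u c h1]
          ring
        · rw [if_neg he]
          by_cases hc : t+1 ≤ u
          · rw [if_pos hc, if_pos (by omega)]
          · rw [if_neg hc, if_neg (by omega)]
      rw [hmap]
      exact ih (t-1) (by omega) (by omega) (by omega)

lemma pv_suf_build (K j : Int) (_hK : 0 ≤ K) (c : Nat) :
    (PySem.List.pyRange K (-1) (-1)).foldl (fun suf k =>
        suf.set k.toNat (PySem.List.pyGetD suf (k+1) 0 + PySem.List.pyGetD (rowF K j c) k 0))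
      ((PySem.List.pyRange 0 (K+2)).map (fun _ => (0:Int)))
      = (PySem.List.pyRange 0 (K+2)).map (fun u => sufS K j c u) := by
  have hbase : ((PySem.List.pyRange 0 (K+2)).map (fun _ => (0:Int)))
      = (PySem.List.pyRange 0 (K+2)).map (fun u => if K+1 ≤ u then sufS K j c u else 0) := by
    apply List.map_congr_left
    intro u hu
    have hmem := PySem.List.mem_pyRange_one.1 hu
    by_cases hc : K+1 ≤ u
    · rw [if_pos hc]
      have hu1 : u = K + 1 := by omega
      subst hu1
      unfold sufS
      rw [PySem.List.pyRange_one_eq_nil (le_refl (K+1))]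
      rfl
    · rw [if_neg hc]
  rw [hbase, pv_suf_aux K j c K (by omega) (le_refl K)]
  apply List.map_congr_left
  intro u hu
  have hmem := PySem.List.mem_pyRange_one.1 hu
  rw [if_pos (by omega : (0:Int) ≤ u)]

lemma pv_B_step (M K : Int) (_hM : 1 ≤ M) (hMK : M ≤ K) (c : Nat) :
    (PySem.List.pyRange 1 (M+1)).foldl (fun nxt j =>
      let suf := (PySem.List.pyRange 0 (K+2)).map (fun _ => (0 : Int))
      let suf := (PySem.List.pyRange K (-1) (-1)).foldl (fun suf k =>
        suf.set k.toNat (PySem.List.pyGetD suf (k+1) 0 +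
          PySem.List.pyGetD (PySem.List.pyGetD (matF M K c) j []) k 0)) suf
      (PySem.List.pyRange j (K+1)).foldl (fun nxt k =>
        nxt.modify j.toNat (fun cc => cc.set k.toNat (PySem.List.pyGetD suf (k-j) 0))) nxt)
      (zMat M K)
      = matF M K (c+1) := by
  rw [PySem.List.foldl_congr_mem _ _
       (fun nxt j => nxt.modify j.toNat (fun row =>
          (PySem.List.pyRange j (K+1)).foldl (fun row k =>
            row.set k.toNat (sufS K j c (k-j))) row)) _
       (by
         intro nxt j hj
         have hjm := PySem.List.mem_pyRange_one.1 hj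
         show (PySem.List.pyRange j (K+1)).foldl (fun nxt k =>
             nxt.modify j.toNat (fun cc => cc.set k.toNat (PySem.List.pyGetD
               ((PySem.List.pyRange K (-1) (-1)).foldl (fun suf k =>
                  suf.set k.toNat (PySem.List.pyGetD suf (k+1) 0 +
                    PySem.List.pyGetD (PySem.List.pyGetD (matF M K c) j []) k 0))
                 ((PySem.List.pyRange 0 (K+2)).map (fun _ => (0 : Int)))) (k-j) 0))) nxt
           = _
         rw [pv_get_matF M K j c (by omega) (by omega),
             pv_suf_build K j (by omega) c]
         refine (pv_foldl_modify_same (PySem.List.pyRange j (K+1)) j.toNat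
             (fun k => fun (cc : List Int) => cc.set k.toNat
               (PySem.List.pyGetD ((PySem.List.pyRange 0 (K+2)).map (fun u => sufS K j c u)) (k-j) 0))
             nxt).trans ?_
         congr 1
         funext row
         apply PySem.List.foldl_congr_mem
         intro acc k hk
         have hkm := PySem.List.mem_pyRange_one.1 hk
         rw [PySem.List.pyGetD_map_pyRange_of_nonneg _ _ _ _ (by omega) (by omega)])]
  unfold zMat
  rw [pv_foldl_modify_distinct _ _ (M+1) 1 (M+1) (by omega) (by omega)]
  unfold matF
  apply List.map_congr_left
  intro u hu
  have humem := PySem.List.mem_pyRange_one.1 hu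
  by_cases hc : 1 ≤ u
  · rw [if_pos ⟨hc, by omega⟩, if_pos hc, pv_row_step K u c hc (by omega)]
  · rw [if_neg (by omega), if_neg hc]

lemma pv_B_loop (M K : Int) (hM : 1 ≤ M) (hMK : M ≤ K) (l : List Int) (c : Nat) :
    l.foldl (fun cur _ =>
      let nxt0 := (PySem.List.pyRange 0 (M+1)).map (fun _ =>
        (PySem.List.pyRange 0 (K+1)).map (fun _ => (0 : Int)))
      (PySem.List.pyRange 1 (M+1)).foldl (fun nxt j =>
        let suf := (PySem.List.pyRange 0 (K+2)).map (fun _ => (0 : Int))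
        let suf := (PySem.List.pyRange K (-1) (-1)).foldl (fun suf k =>
          suf.set k.toNat (PySem.List.pyGetD suf (k+1) 0 +
            PySem.List.pyGetD (PySem.List.pyGetD cur j []) k 0)) suf
        (PySem.List.pyRange j (K+1)).foldl (fun nxt k =>
          nxt.modify j.toNat (fun cc => cc.set k.toNat (PySem.List.pyGetD suf (k-j) 0))) nxt) nxt0)
      (matF M K c)
      = matF M K (c + l.length) := by
  induction l generalizing c with
  | nil => simp
  | cons x l ihl =>
      simp only [List.foldl_cons]
      have hstep : (PySem.List.pyRange 1 (M+1)).foldl (fun nxt j =>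
          let suf := (PySem.List.pyRange 0 (K+2)).map (fun _ => (0 : Int))
          let suf := (PySem.List.pyRange K (-1) (-1)).foldl (fun suf k =>
            suf.set k.toNat (PySem.List.pyGetD suf (k+1) 0 +
              PySem.List.pyGetD (PySem.List.pyGetD (matF M K c) j []) k 0)) suf
          (PySem.List.pyRange j (K+1)).foldl (fun nxt k =>
            nxt.modify j.toNat (fun cc => cc.set k.toNat (PySem.List.pyGetD suf (k-j) 0))) nxt)
          ((PySem.List.pyRange 0 (M+1)).map (fun _ =>
            (PySem.List.pyRange 0 (K+1)).map (fun _ => (0 : Int))))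
          = matF M K (c+1) := pv_B_step M K hM hMK c
      rw [hstep, ihl (c+1)]
      congr 1
      simp only [List.length_cons]
      omega


lemma pv_main (N M K : Int) (h : Pre_solve N M K) : solve N M K = solve_alt N M K := by
  by_cases hM : M ≤ 0
  · have hnil : PySem.List.pyRange 1 (M+1) = [] := PySem.List.pyRange_one_eq_nil (by omega)
    simp only [solve, solve_alt, hnil, List.foldl_nil, PySem.List.foldl_ignore, hM, if_true]
    decide
  · have hM1 : 1 ≤ M := by omega
    obtain hN : 1 ≤ N := by rcases h with h | ⟨h1, _, _⟩; omega; exact h1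
    obtain hMK : M ≤ K := by rcases h with h | ⟨_, _, h3⟩; omega; exact h3
    simp only [solve, solve_alt, if_neg hM]
    have h1 : (PySem.List.pyRange 1 (M+1)).foldl (fun dp i =>
        dp.modify 1 (fun r => r.modify i.toNat (fun c => c.set i.toNat 1)))
        ((PySem.List.pyRange 0 (N+1)).map (fun _ =>
          (PySem.List.pyRange 0 (M+1)).map (fun _ =>
            (PySem.List.pyRange 0 (K+1)).map (fun _ => (0 : Int)))))
        = dpF N M K 1 := pv_A_init N M K hN hM1 hMK
    rw [h1]
    have h2 : (PySem.List.pyRange 2 (N+1)).foldl (fun dp i =>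
        (PySem.List.pyRange 1 (M+1)).foldl (fun dp j =>
          (PySem.List.pyRange 1 (K+1)).foldl (fun dp k =>
            if k - j ≥ 0 then
              dp.modify i.toNat (fun r => r.modify j.toNat (fun c => c.set k.toNat
                ((PySem.List.slice (PySem.List.pyGetD (PySem.List.pyGetD dp (i-1) []) j []) (some (k-j)) none).sum)))
            else dp) dp) dp) (dpF N M K 1)
        = dpF N M K N := by
      have := pv_A_loop N M K hM1 hMK 1 (le_refl 1) hN
      rw [show (1:Int)+1 = 2 from by norm_num] at this
      exact this
    rw [h2, pv_get_dpF N M K N N (by omega) (le_refl N) hN (le_refl N)]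
    have hb1 : (PySem.List.pyRange 1 (M+1)).foldl (fun cur j =>
        cur.modify j.toNat (fun c => c.set j.toNat 1))
        ((PySem.List.pyRange 0 (M+1)).map (fun _ =>
          (PySem.List.pyRange 0 (K+1)).map (fun _ => (0 : Int))))
        = matF M K 0 := pv_mat_init M K hM1 hMK
    rw [hb1]
    have hb2 := pv_B_loop M K hM1 hMK (PySem.List.pyRange 2 (N+1)) 0
    rw [hb2, show (0 + (PySem.List.pyRange 2 (N+1)).length) = (N-1).toNat from by
      rw [PySem.List.length_pyRange_one]; omega]

-- ===== VERDICT (by name: the statement is the Claim_ definition above) =====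
theorem solve_spec : Claim_equal_solve := by
  intro N M K _ hpre
  unfold Spec_solve
  exact pv_main N M K hpre
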